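-- pv_equiv track=rewrite | github.com/aitechwizard/coze_upload | main.py | filter_had_upload_file
-- ===== SOURCE A (Python) =====
-- def filter_had_upload_file(ready_upload_files, had_upload_files):
--     need_upload_files = []
--     for file in ready_upload_files:
--         if file in had_upload_files:
--             continue
--         exist = False
--         for had_upload_file in had_upload_files:
--             if had_upload_file in file:
--                 exist = True
--                 break
--         if exist:
--             continue
--         need_upload_files.append(file)
--     return need_upload_files
-- ===== SOURCE B (Python) =====
-- def filter_had_upload_file(ready_upload_files, had_upload_files):
--     # Pattern-major staged passes: start with a boolean keep-mask over the
--     # ready files, and for each already-uploaded name sweep the mask once,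
--     # clearing the entries whose file contains that name (list equality
--     # 'file in had_upload_files' is subsumed: such a file contains that
--     # name as a substring).  Finally project the surviving files out.
--     keep = [True] * len(ready_upload_files)
--     for h in had_upload_files:
--         keep = [k and h not in f for k, f in zip(keep, ready_upload_files)]
--     return [f for k, f in zip(keep, ready_upload_files) if k]
-- ===== Notes on version B (the rewrite author's own statement) =====
-- stated objective: alternative
-- what changed: B transposes the nested loops: instead of A's file-major scan with an exact-membership shortcut and a break/flag inner loop over patterns, B is pattern-major - it maintains a boolean keep-mask over the ready files, sweeps the mask once per already-uploaded name clearing matches, and finally projects the surviving files; the exact-membership check disappears because it is subsumed by the substring sweep.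
import Mathlib
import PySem

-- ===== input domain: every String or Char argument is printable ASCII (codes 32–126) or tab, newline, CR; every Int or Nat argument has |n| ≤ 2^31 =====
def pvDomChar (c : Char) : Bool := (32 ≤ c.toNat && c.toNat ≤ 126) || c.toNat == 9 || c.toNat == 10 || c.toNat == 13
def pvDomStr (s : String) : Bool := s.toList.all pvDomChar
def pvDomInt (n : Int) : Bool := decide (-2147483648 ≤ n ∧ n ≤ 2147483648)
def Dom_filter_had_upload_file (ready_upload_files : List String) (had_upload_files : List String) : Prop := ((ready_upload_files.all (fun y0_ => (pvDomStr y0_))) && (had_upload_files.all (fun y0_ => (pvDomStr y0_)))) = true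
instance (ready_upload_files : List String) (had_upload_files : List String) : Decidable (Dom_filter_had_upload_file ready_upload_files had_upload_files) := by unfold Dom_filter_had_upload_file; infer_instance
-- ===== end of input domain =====

-- B transposes the loops: a boolean keep-mask over the ready files is swept once per
-- already-uploaded name (pattern-major), then the survivors are projected out ('alternative').

-- ===== PORT A =====
-- inner 'for had_upload_file in had_upload_files: if had_upload_file in file: exist = True; break'
def pvExistLoop (had_upload_files : List String) (file : String) : Bool :=
  match had_upload_files with
  | [] => false
  | h :: t => if PySem.Str.isIn h file then true else pvExistLoop t file

def filter_had_upload_file (ready_upload_files : List String) (had_upload_files : List String) : List String :=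
  ready_upload_files.foldl
    (fun need_upload_files file =>
      if had_upload_files.contains file then need_upload_files
      else if pvExistLoop had_upload_files file then need_upload_files
      else need_upload_files ++ [file])
    []

-- ===== PORT B =====
def filter_had_upload_file_alt (ready_upload_files : List String) (had_upload_files : List String) : List String :=
  let keep0 := List.replicate ready_upload_files.length true
  let keep := had_upload_files.foldl
    (fun keep h =>
      (keep.zip ready_upload_files).map (fun p => p.1 && !(PySem.Str.isIn h p.2)))
    keep0
  ((keep.zip ready_upload_files).filter (fun p => p.1)).map (fun p => p.2)

-- ===== PRECONDITION & SPEC =====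
def Spec_filter_had_upload_file (ready_upload_files : List String) (had_upload_files : List String) (out : List String) : Prop := out = filter_had_upload_file_alt ready_upload_files had_upload_files
instance (ready_upload_files : List String) (had_upload_files : List String) (out : List String) : Decidable (Spec_filter_had_upload_file ready_upload_files had_upload_files out) := by unfold Spec_filter_had_upload_file; infer_instance

-- ===== CLAIM (what is proved, stated in full; the proofs are below) =====
def Claim_equal_filter_had_upload_file : Prop := ∀ (ready_upload_files : List String) (had_upload_files : List String), Dom_filter_had_upload_file ready_upload_files had_upload_files → Spec_filter_had_upload_file ready_upload_files had_upload_files (filter_had_upload_file ready_upload_files had_upload_files)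

-- ===== LEMMAS AND PROOFS =====

-- A's flag/break inner loop computes 'some had file is a substring of file'
theorem pvExistLoop_eq_any (had : List String) (file : String) :
    pvExistLoop had file = had.any (fun h => PySem.Str.isIn h file) := by
  induction had with
  | nil => rfl
  | cons h t ih => simp [pvExistLoop, List.any_cons, ih]

-- A's exact-membership check is subsumed by the substring check
theorem contains_any (had : List String) (file : String)
    (hm : had.contains file = true) :
    had.any (fun h => PySem.Str.isIn h file) = true := by
  rw [List.any_eq_true]
  refine ⟨file, by simpa using hm, ?_⟩
  rw [PySem.Str.isIn_iff_infix]

-- A's accumulator loop is the order-preserving filter by the any-substring test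
theorem foldl_eq_filter (had : List String) (ready acc : List String) :
    ready.foldl
      (fun need file =>
        if had.contains file then need
        else if pvExistLoop had file then need
        else need ++ [file]) acc
    = acc ++ ready.filter (fun f => !(had.any (fun h => PySem.Str.isIn h f))) := by
  simp only [pvExistLoop_eq_any]
  induction ready generalizing acc with
  | nil => simp
  | cons f t ih =>
    rw [List.foldl_cons, List.filter_cons]
    cases hm : had.contains f with
    | true =>
      rw [contains_any had f hm]
      simp only [Bool.not_true, reduceIte, Bool.false_eq_true]
      exact ih acc
    | false =>
      cases he : had.any (fun h => PySem.Str.isIn h f) with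
      | true =>
        simp only [Bool.not_true, reduceIte, Bool.false_eq_true]
        exact ih acc
      | false =>
        simp only [Bool.not_false, reduceIte, Bool.false_eq_true]
        rw [ih (acc ++ [f])]
        simp

-- one mask sweep, applied to a mask that is already a pointwise function of the files
theorem sweep_map (ready : List String) (g : String → Bool) (q : String → Bool) :
    ((ready.map g).zip ready).map (fun p => p.1 && q p.2)
      = ready.map (fun f => g f && q f) := by
  induction ready with
  | nil => rfl
  | cons f t ih => simp [List.map_cons, List.zip_cons_cons, ih]

-- B's foldl over the patterns yields the all-non-substring mask
theorem mask_invariant (had ready : List String) (g : String → Bool) :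
    had.foldl
      (fun keep h => (keep.zip ready).map (fun p => p.1 && !(PySem.Str.isIn h p.2)))
      (ready.map g)
    = ready.map (fun f => g f && had.all (fun h => !(PySem.Str.isIn h f))) := by
  induction had generalizing g with
  | nil => simp
  | cons h t ih =>
    rw [List.foldl_cons, sweep_map ready g (fun f => !(PySem.Str.isIn h f)),
        ih (fun f => g f && !(PySem.Str.isIn h f))]
    simp [Bool.and_assoc]

-- projecting the survivors of a pointwise mask is an ordinary filter
theorem project_mask (ready : List String) (g : String → Bool) :
    (((ready.map g).zip ready).filter (fun p => p.1)).map (fun p => p.2)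
      = ready.filter g := by
  induction ready with
  | nil => rfl
  | cons f t ih =>
    cases hg : g f <;> simp [List.map_cons, List.zip_cons_cons, hg, ih]

-- the two filter predicates agree pointwise
theorem not_any_eq_all (had : List String) (f : String) :
    (!(had.any (fun h => PySem.Str.isIn h f)))
      = had.all (fun h => !(PySem.Str.isIn h f)) := by
  induction had with
  | nil => rfl
  | cons h t ih => rw [List.any_cons, List.all_cons, Bool.not_or, ih]

-- B's lets, zeta-reduced
theorem alt_unfolded (ready had : List String) :
    filter_had_upload_file_alt ready had
      = ((((had.foldl
              (fun keep h => (keep.zip ready).map (fun p => p.1 && !(PySem.Str.isIn h p.2)))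
              (List.replicate ready.length true)).zip ready).filter (fun p => p.1)).map
          (fun p => p.2)) := rfl

-- ===== VERDICT (by name: the statement is the Claim_ definition above) =====
theorem filter_had_upload_file_spec : Claim_equal_filter_had_upload_file := by
  intro ready had _
  show filter_had_upload_file ready had = filter_had_upload_file_alt ready had
  have hrep : List.replicate ready.length true = ready.map (fun _ => true) := by
    simp [List.map_const']
  rw [alt_unfolded, hrep, mask_invariant had ready (fun _ => true)]
  simp only [Bool.true_and]
  rw [project_mask ready (fun f => had.all (fun h => !(PySem.Str.isIn h f)))]
  unfold filter_had_upload_file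
  rw [foldl_eq_filter had ready [], List.nil_append]
  exact List.filter_congr (fun f _ => by rw [not_any_eq_all])
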